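-- pv_equiv track=rewrite | github.com/gsel9/biorad | plotting/biclustering.py | format_feature_labels
-- ===== SOURCE A (Python) =====
-- def format_feature_labels(labels):
--     """Process raw feature labels."""
--     prep_labels = []
--     for label in labels:
--         if 'shape' in label:
--             prep_labels.append('Shape')
--         elif 'PETparam' in label:
--             prep_labels.append('PET Parameter')
--         elif 'clinical' in label:
--             prep_labels.append('Clinical')
--         elif 'firstorder' in label:
--             prep_labels.append('First Order')
--         elif 'glcm' in label:
--             prep_labels.append('GLCM')
--         elif 'gldm' in label:
--             prep_labels.append('GLDM')
--         elif 'glrlm' in label: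
--             prep_labels.append('GLRLM')
--         elif 'glszm' in label:
--             prep_labels.append('GLSZM')
--         elif 'ngtdm' in label:
--             prep_labels.append('NGTDM')
--         else:
--             raise ValueError(f'Unknown label {label}')
--     return prep_labels
-- ===== SOURCE B (Python) =====
-- RULES = [('shape', 'Shape'), ('PETparam', 'PET Parameter'), ('clinical', 'Clinical'),
--          ('firstorder', 'First Order'), ('glcm', 'GLCM'), ('gldm', 'GLDM'),
--          ('glrlm', 'GLRLM'), ('glszm', 'GLSZM'), ('ngtdm', 'NGTDM')]
--
--
-- def format_feature_labels(labels):
--     """Process raw feature labels."""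
--     # Staged passes: lowest-priority rule first, higher-priority passes overwrite,
--     # so after all passes each slot holds the first matching rule's category.
--     cats = [None] * len(labels)
--     for needle, category in reversed(RULES):
--         for i, label in enumerate(labels):
--             if needle in label:
--                 cats[i] = category
--     for label, category in zip(labels, cats):
--         if category is None:
--             raise ValueError(f'Unknown label {label}')
--     return cats
-- ===== Notes on version B (the rewrite author's own statement) =====
-- stated objective: alternative
-- what changed: Inverts the loop nesting: instead of A's per-label if/elif cascade, B makes one overwriting pass over all labels per rule in reverse priority order, filling a category array, then checks for unmatched slots.
import Mathlib
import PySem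

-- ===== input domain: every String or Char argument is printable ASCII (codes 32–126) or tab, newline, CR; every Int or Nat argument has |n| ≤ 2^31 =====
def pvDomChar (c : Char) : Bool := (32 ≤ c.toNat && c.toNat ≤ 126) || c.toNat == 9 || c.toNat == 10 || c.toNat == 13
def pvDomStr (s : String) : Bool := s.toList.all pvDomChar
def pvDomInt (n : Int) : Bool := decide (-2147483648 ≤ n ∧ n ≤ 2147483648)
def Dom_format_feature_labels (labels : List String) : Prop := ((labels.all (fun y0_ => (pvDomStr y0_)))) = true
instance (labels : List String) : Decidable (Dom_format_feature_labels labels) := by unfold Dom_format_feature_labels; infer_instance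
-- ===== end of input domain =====

-- B replaces A's per-label if/elif cascade by staged overwriting passes over the rules in reverse
-- priority order (alternative decomposition; same cost). Both raise ValueError on a label matching
-- no needle; those inputs are excluded by Pre_.

-- ===== PORT A =====
-- A's if/elif cascade per label; 'none' = the else-branch where Python raises ValueError.
def pvCatA (label : String) : Option String :=
  if PySem.Str.isIn "shape" label then some "Shape"
  else if PySem.Str.isIn "PETparam" label then some "PET Parameter"
  else if PySem.Str.isIn "clinical" label then some "Clinical"
  else if PySem.Str.isIn "firstorder" label then some "First Order"
  else if PySem.Str.isIn "glcm" label then some "GLCM"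
  else if PySem.Str.isIn "gldm" label then some "GLDM"
  else if PySem.Str.isIn "glrlm" label then some "GLRLM"
  else if PySem.Str.isIn "glszm" label then some "GLSZM"
  else if PySem.Str.isIn "ngtdm" label then some "NGTDM"
  else none

def pvRunA : List String → Option (List String)
  | [] => some []
  | l :: ls =>
    match pvCatA l with
    | some c => (pvRunA ls).map (c :: ·)
    | none => none

def format_feature_labels (labels : List String) : List String :=
  (pvRunA labels).getD []

-- ===== PORT B =====
def pvRules : List (String × String) :=
  [("shape", "Shape"), ("PETparam", "PET Parameter"), ("clinical", "Clinical"),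
   ("firstorder", "First Order"), ("glcm", "GLCM"), ("gldm", "GLDM"),
   ("glrlm", "GLRLM"), ("glszm", "GLSZM"), ("ngtdm", "NGTDM")]

-- B's passes: for each rule (reverse priority order) overwrite the slot of every matching label;
-- the final check-for-None loop raising ValueError is the 'if … then … else []' guard.
def format_feature_labels_alt (labels : List String) : List String :=
  let cats := pvRules.reverse.foldl
    (fun cats r =>
      List.zipWith (fun c l => if PySem.Str.isIn r.1 l then some r.2 else c) cats labels)
    (labels.map (fun _ => (none : Option String)))
  if cats.all Option.isSome then cats.map (fun c => c.getD "") else []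

-- ===== PRECONDITION & SPEC =====
-- Pre_ excludes labels containing none of the nine needles, where A (and B) raise ValueError.
def Pre_format_feature_labels (labels : List String) : Prop :=
  (labels.all (fun l =>
    (["shape", "PETparam", "clinical", "firstorder", "glcm", "gldm", "glrlm", "glszm", "ngtdm"].any
      (fun n => PySem.Str.isIn n l)))) = true
instance (labels : List String) : Decidable (Pre_format_feature_labels labels) := by
  unfold Pre_format_feature_labels; infer_instance
def pvWitness_format_feature_labels : List String := ["shape_x", "wavelet_glcm", "ngtdm1"]

def Spec_format_feature_labels (labels : List String) (out : List String) : Prop := out = format_feature_labels_alt labels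
instance (labels : List String) (out : List String) : Decidable (Spec_format_feature_labels labels out) := by unfold Spec_format_feature_labels; infer_instance

-- ===== CLAIM (what is proved, stated in full; the proofs are below) =====
def Claim_equal_format_feature_labels : Prop := ∀ (labels : List String), Dom_format_feature_labels labels → Pre_format_feature_labels labels → Spec_format_feature_labels labels (format_feature_labels labels)

-- ===== LEMMAS AND PROOFS =====

-- a zipWith-update of an elementwise-built list is elementwise
theorem pvZip (f : Option String → String → Option String) (g : String → Option String)
    (labels : List String) :
    List.zipWith f (labels.map g) labels = labels.map (fun l => f (g l) l) := by
  induction labels with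
  | nil => rfl
  | cons l ls ih => simp [ih]

-- B's staged passes compute, per label, the reverse fold over the rules
theorem pvFold (rs : List (String × String)) (g : String → Option String) (labels : List String) :
    rs.foldl
      (fun cats r =>
        List.zipWith (fun c l => if PySem.Str.isIn r.1 l then some r.2 else c) cats labels)
      (labels.map g)
    = labels.map (fun l =>
        rs.foldl (fun c r => if PySem.Str.isIn r.1 l then some r.2 else c) (g l)) := by
  induction rs generalizing g with
  | nil => rfl
  | cons r rs ih =>
    simp only [List.foldl_cons, pvZip]
    exact ih (fun l => if PySem.Str.isIn r.1 l then some r.2 else g l)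

-- last-write-wins over the reversed rules = first-match cascade
theorem pvCatFold (l : String) :
    pvRules.reverse.foldl (fun c r => if PySem.Str.isIn r.1 l then some r.2 else c) none
    = pvCatA l := rfl

theorem pvCatA_some (l : String)
    (h : (["shape", "PETparam", "clinical", "firstorder", "glcm", "gldm", "glrlm", "glszm",
           "ngtdm"].any (fun n => PySem.Str.isIn n l)) = true) :
    (pvCatA l).isSome := by
  simp only [pvCatA]
  split_ifs <;> simp_all

theorem pvRunA_eq (labels : List String) (h : Pre_format_feature_labels labels) :
    pvRunA labels = some (labels.map (fun l => (pvCatA l).getD "")) := by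
  induction labels with
  | nil => rfl
  | cons l ls ih =>
    unfold Pre_format_feature_labels at h
    simp only [List.all_cons, Bool.and_eq_true] at h
    have hl := pvCatA_some l h.1
    have := ih h.2
    cases hc : pvCatA l with
    | none => simp [hc] at hl
    | some c => simp [pvRunA, hc, this]

-- ===== VERDICT (by name: the statement is the Claim_ definition above) =====
theorem format_feature_labels_spec : Claim_equal_format_feature_labels := by
  intro labels _ hpre
  unfold Spec_format_feature_labels format_feature_labels format_feature_labels_alt
  rw [pvFold]
  simp only [pvCatFold]
  have hall : (labels.map (fun l => pvCatA l)).all Option.isSome = true := by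
    unfold Pre_format_feature_labels at hpre
    simp only [List.all_eq_true] at hpre ⊢
    intro c hc
    obtain ⟨l, hl, rfl⟩ := List.mem_map.mp hc
    exact pvCatA_some l (hpre l hl)
  rw [pvRunA_eq labels hpre]
  simp [hall]
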